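-- pv_equiv track=rewrite | github.com/jfinkels/PADS | pads/xyz_graph.py | isxyz
-- ===== SOURCE A (Python) =====
-- from collections import defaultdict
--
-- def isxyz(points):
--     """
--     True if there are two points per axis-parallel line, False otherwise.
--     """
--     for i, j in [(0, 1), (0, 2), (1, 2)]:
--         projections = defaultdict(list)
--         for p in points:
--             projections[p[i], p[j]].append(p)
--         for L in projections.values():
--             if len(L) != 2:
--                 return False
--     return True
-- ===== SOURCE B (Python) =====
-- def isxyz(points):
--     """
--     True if there are two points per axis-parallel line, False otherwise.
--
--     Sorts the projection keys per axis pair and checks that every run of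
--     equal consecutive keys has length exactly 2 (instead of hashing into
--     buckets of points).
--     """
--     for i, j in ((0, 1), (0, 2), (1, 2)):
--         keys = sorted((p[i], p[j]) for p in points)
--         if keys:
--             prev = keys[0]
--             run = 1
--             for k in keys[1:]:
--                 if k == prev:
--                     run += 1
--                 elif run == 2:
--                     prev = k
--                     run = 1
--                 else:
--                     return False
--             if run != 2:
--                 return False
--     return True
-- ===== Notes on version B (the rewrite author's own statement) =====
-- stated objective: alternative
-- what changed: Replaces per-axis hashing of points into defaultdict(list) buckets by sorting the projection keys per axis pair and scanning consecutive runs with a manual run counter, failing as soon as a run's length differs from 2.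
import Mathlib
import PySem

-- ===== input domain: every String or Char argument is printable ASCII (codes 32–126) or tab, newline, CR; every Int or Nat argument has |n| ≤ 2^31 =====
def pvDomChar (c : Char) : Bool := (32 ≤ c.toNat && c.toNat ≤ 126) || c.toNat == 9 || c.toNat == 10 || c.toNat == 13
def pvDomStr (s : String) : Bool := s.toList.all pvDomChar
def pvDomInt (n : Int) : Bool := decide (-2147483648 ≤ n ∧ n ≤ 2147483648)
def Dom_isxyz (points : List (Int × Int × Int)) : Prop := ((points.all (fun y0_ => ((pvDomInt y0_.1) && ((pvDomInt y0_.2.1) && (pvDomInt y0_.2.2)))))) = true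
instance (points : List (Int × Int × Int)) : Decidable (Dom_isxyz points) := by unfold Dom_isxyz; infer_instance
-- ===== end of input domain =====

-- B sorts the projection keys per axis pair and scans consecutive runs instead of
-- hashing points into buckets; return values agree everywhere (alternative algorithm).

-- ===== PORT A =====
-- p[i] for the literal indices 0,1,2 used by both Pythons
def pget (p : Int × Int × Int) (i : Nat) : Int :=
  match i with
  | 0 => p.1
  | 1 => p.2.1
  | _ => p.2.2

-- the outer 'for i, j in [(0,1),(0,2),(1,2)]' loop with its early 'return False'
def isxyzAxes (points : List (Int × Int × Int)) : List (Nat × Nat) → Bool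
  | [] => true
  | (i, j) :: rest =>
      let projections := points.foldl
        (fun d p => d.modify (pget p i, pget p j) [] (fun L => L ++ [p]))
        PySem.Dict.empty
      if projections.values.all (fun L => L.length == 2) then isxyzAxes points rest
      else false

def isxyz (points : List (Int × Int × Int)) : Bool :=
  isxyzAxes points [(0, 1), (0, 2), (1, 2)]

-- ===== PORT B =====
-- the 'for k in keys[1:]' run counter of Source B (prev, run are the loop state)
def chase : (Int × Int) → Int → List (Int × Int) → Bool
  | _, run, [] => run == 2
  | prev, run, k :: rest =>
      if k == prev then chase prev (run + 1) rest
      else if run == 2 then chase k 1 rest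
      else false

-- the 'if keys:' body of Source B for one axis pair
def axisRuns (keys : List (Int × Int)) : Bool :=
  match keys with
  | [] => true
  | p0 :: tl => chase p0 1 tl

def isxyzAltAxes (points : List (Int × Int × Int)) : List (Nat × Nat) → Bool
  | [] => true
  | (i, j) :: rest =>
      let keys := PySem.List.sorted2 (points.map (fun p => (pget p i, pget p j)))
        (fun k => k.1) (fun k => k.2) false
      if axisRuns keys then isxyzAltAxes points rest
      else false

def isxyz_alt (points : List (Int × Int × Int)) : Bool :=
  isxyzAltAxes points [(0, 1), (0, 2), (1, 2)]

-- ===== PRECONDITION & SPEC =====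
def Spec_isxyz (points : List (Int × Int × Int)) (out : Bool) : Prop := out = isxyz_alt points
instance (points : List (Int × Int × Int)) (out : Bool) : Decidable (Spec_isxyz points out) := by unfold Spec_isxyz; infer_instance

-- ===== CLAIM (what is proved, stated in full; the proofs are below) =====
def Claim_equal_isxyz : Prop := ∀ (points : List (Int × Int × Int)), Dom_isxyz points → Spec_isxyz points (isxyz points)

-- ===== LEMMAS AND PROOFS =====

-- lexicographic order on pairs (Python's tuple comparison)
def lexle (a b : Int × Int) : Prop := a.1 < b.1 ∨ (a.1 = b.1 ∧ a.2 ≤ b.2)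

-- the comparator sorted2 uses with keys (·.1), (·.2)
def blt (a b : Int × Int) : Bool :=
  decide (a.1 < b.1) || (!decide (b.1 < a.1) && decide (a.2 < b.2))

theorem lexle_of_blt {a b : Int × Int} (h : blt a b = true) : lexle a b := by
  unfold blt at h; unfold lexle
  simp only [Bool.or_eq_true, Bool.and_eq_true, Bool.not_eq_true', decide_eq_true_eq,
    decide_eq_false_iff_not] at h
  rcases h with h | ⟨h1, h2⟩
  · exact Or.inl h
  · rcases lt_or_ge a.1 b.1 with h3 | h3
    · exact Or.inl h3
    · exact Or.inr ⟨le_antisymm (le_of_not_gt h1) h3 |>.symm ▸ rfl, le_of_lt h2⟩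

theorem lexle_of_not_blt {a b : Int × Int} (h : blt a b = false) : lexle b a := by
  unfold blt at h; unfold lexle
  simp only [Bool.or_eq_false_iff, Bool.and_eq_false_iff, Bool.not_eq_false',
    decide_eq_true_eq, decide_eq_false_iff_not] at h
  obtain ⟨h1, h2⟩ := h
  rcases h2 with h2 | h2
  · exact Or.inl h2
  · rcases lt_or_ge b.1 a.1 with h3 | h3
    · exact Or.inl h3
    · exact Or.inr ⟨le_antisymm (le_of_not_gt h1) h3, le_of_not_gt h2⟩

theorem lexle_trans {a b c : Int × Int} (h1 : lexle a b) (h2 : lexle b c) : lexle a c := by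
  unfold lexle at *; rcases h1 with h1 | ⟨h1, h1'⟩ <;> rcases h2 with h2 | ⟨h2, h2'⟩ <;>
    [exact Or.inl (h1.trans h2); exact Or.inl (h2 ▸ h1); exact Or.inl (h1 ▸ h2);
     exact Or.inr ⟨h1.trans h2, h1'.trans h2'⟩]

theorem lexle_antisymm {a b : Int × Int} (h1 : lexle a b) (h2 : lexle b a) : a = b := by
  unfold lexle at *
  have : a.1 = b.1 ∧ a.2 = b.2 := by
    rcases h1 with h1 | ⟨h1, h1'⟩ <;> rcases h2 with h2 | ⟨h2, h2'⟩ <;> omega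
  exact Prod.ext this.1 this.2

theorem insertBy_pairwise_lexle (x : Int × Int) (ys : List (Int × Int))
    (h : ys.Pairwise lexle) : (PySem.List.insertBy blt x ys).Pairwise lexle := by
  induction ys with
  | nil => simp [PySem.List.insertBy]
  | cons y ys ih =>
    rw [PySem.List.insertBy]
    by_cases hby : blt x y = true
    · rw [if_pos hby]
      rw [List.pairwise_cons] at h ⊢
      constructor
      · intro z hz
        rcases List.mem_cons.1 hz with rfl | hz
        · exact lexle_of_blt hby
        · exact lexle_trans (lexle_of_blt hby) (h.1 z hz)
      · exact List.pairwise_cons.2 h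
    · rw [if_neg hby]
      have hby' : blt x y = false := by simpa using hby
      rw [List.pairwise_cons] at h ⊢
      refine ⟨fun z hz => ?_, ih h.2⟩
      rcases (PySem.List.mem_insertBy blt x z ys).1 hz with rfl | hz
      · exact lexle_of_not_blt hby'
      · exact h.1 z hz

theorem foldl_insertBy_pairwise (xs : List (Int × Int)) (acc : List (Int × Int))
    (hacc : acc.Pairwise lexle) :
    (xs.foldl (fun acc x => PySem.List.insertBy blt x acc) acc).Pairwise lexle := by
  induction xs generalizing acc with
  | nil => exact hacc
  | cons x xs ih => exact ih _ (insertBy_pairwise_lexle x acc hacc)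

theorem sorted2_pairwise_lexle (xs : List (Int × Int)) :
    (PySem.List.sorted2 xs (fun k => k.1) (fun k => k.2) false).Pairwise lexle := by
  have h : PySem.List.sorted2 xs (fun k => k.1) (fun k => k.2) false
      = xs.foldl (fun acc x => PySem.List.insertBy blt x acc) [] := by
    simp only [PySem.List.sorted2]
    rfl
  rw [h]
  exact foldl_insertBy_pairwise xs [] List.Pairwise.nil

theorem chase_spec (rest : List (Int × Int)) (prev : Int × Int) (run : Int)
    (h : (prev :: rest).Pairwise lexle) :
    chase prev run rest = true ↔
      (run + (rest.count prev : Int) = 2 ∧ ∀ k ∈ rest, k ≠ prev → rest.count k = 2) := by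
  induction rest generalizing prev run with
  | nil =>
    simp only [chase, List.count_nil, List.not_mem_nil, beq_iff_eq]
    constructor
    · intro hr; exact ⟨by omega, by intro k hk; exact absurd hk (by simp)⟩
    · intro ⟨hr, _⟩; omega
  | cons k rest ih =>
    have hpk : lexle prev k := (List.pairwise_cons.1 h).1 k (by simp)
    have htail : (k :: rest).Pairwise lexle := (List.pairwise_cons.1 h).2
    by_cases hk : k = prev
    · subst hk
      rw [chase, if_pos (by simp)]
      rw [ih k (run + 1) (by
        rw [List.pairwise_cons] at h ⊢
        exact ⟨fun z hz => h.1 z (List.mem_cons_of_mem k hz), (List.pairwise_cons.1 h.2).2⟩)]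
      constructor
      · intro ⟨h1, h2⟩
        refine ⟨by rw [List.count_cons_self]; push_cast; omega, ?_⟩
        intro k' hk' hne
        rcases List.mem_cons.1 hk' with rfl | hk'
        · exact absurd rfl hne
        · rw [List.count_cons_of_ne (Ne.symm hne)]; exact h2 k' hk' hne
      · intro ⟨h1, h2⟩
        rw [List.count_cons_self] at h1
        refine ⟨by push_cast at h1 ⊢; omega, ?_⟩
        intro k' hk' hne
        have := h2 k' (List.mem_cons_of_mem k hk') hne
        rwa [List.count_cons_of_ne (Ne.symm hne)] at this
    · have hprevnot : prev ∉ (k :: rest) := by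
        intro hmem
        rcases List.mem_cons.1 hmem with h1 | h1
        · exact hk h1.symm
        · exact hk (lexle_antisymm ((List.pairwise_cons.1 htail).1 prev h1) hpk)
      have hcnt0 : (k :: rest).count prev = 0 := List.count_eq_zero.2 hprevnot
      have hprevnotr : prev ∉ rest := fun hm => hprevnot (List.mem_cons_of_mem k hm)
      rw [chase, if_neg (by simp [hk])]
      by_cases hrun : run = 2
      · rw [if_pos (by simp [hrun]), ih k 1 htail]
        constructor
        · intro ⟨h1, h2⟩
          refine ⟨by rw [hcnt0]; push_cast; omega, ?_⟩
          intro k' hk' _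
          rcases List.mem_cons.1 hk' with rfl | hk'
          · rw [List.count_cons_self]; omega
          · by_cases hkk : k' = k
            · subst hkk; rw [List.count_cons_self]; omega
            · rw [List.count_cons_of_ne (Ne.symm hkk)]; exact h2 k' hk' hkk
        · intro ⟨_, h2⟩
          have hck : (1 : Int) + rest.count k = 2 := by
            have := h2 k (by simp) (fun hkp => hk hkp)
            rw [List.count_cons_self] at this; omega
          refine ⟨hck, ?_⟩
          intro k' hk' hkk
          have hne' : k' ≠ prev := fun hkp => hprevnotr (hkp ▸ hk')
          have := h2 k' (List.mem_cons_of_mem k hk') hne'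
          rwa [List.count_cons_of_ne (Ne.symm hkk)] at this
      · rw [if_neg (by simp [hrun])]
        simp only [Bool.false_eq_true, false_iff, not_and]
        intro h1
        rw [hcnt0] at h1
        exact absurd (by push_cast at h1; omega) hrun

theorem axisRuns_iff (keys : List (Int × Int)) (h : keys.Pairwise lexle) :
    axisRuns keys = true ↔ ∀ k ∈ keys, keys.count k = 2 := by
  match keys with
  | [] => simp [axisRuns]
  | p0 :: tl =>
    show chase p0 1 tl = true ↔ _
    rw [chase_spec tl p0 1 h]
    constructor
    · intro ⟨h1, h2⟩ k hk
      rcases List.mem_cons.1 hk with rfl | hk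
      · rw [List.count_cons_self]; omega
      · by_cases hkp : k = p0
        · subst hkp; rw [List.count_cons_self]; omega
        · rw [List.count_cons_of_ne (Ne.symm hkp)]; exact h2 k hk hkp
    · intro hall
      constructor
      · have := hall p0 (by simp)
        rw [List.count_cons_self] at this; omega
      · intro k hk hkp
        have := hall k (List.mem_cons_of_mem p0 hk)
        rwa [List.count_cons_of_ne (Ne.symm hkp)] at this

theorem Baxis_iff (K : List (Int × Int)) :
    axisRuns (PySem.List.sorted2 K (fun k => k.1) (fun k => k.2) false) = true ↔
      ∀ k ∈ K, K.count k = 2 := by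
  have hperm := PySem.List.sorted2_perm K (fun k => k.1) (fun k => k.2) false
  rw [axisRuns_iff _ (sorted2_pairwise_lexle K)]
  constructor
  · intro hall k hk
    rw [← hperm.count_eq]
    exact hall k (hperm.mem_iff.2 hk)
  · intro hall k hk
    rw [hperm.count_eq]
    exact hall k (hperm.mem_iff.1 hk)

theorem Aaxis_iff (points : List (Int × Int × Int)) (i j : Nat) :
    ((points.foldl (fun d p => d.modify (pget p i, pget p j) [] (fun L => L ++ [p]))
        PySem.Dict.empty).values.all (fun L => L.length == 2)) = true ↔
      ∀ k ∈ points.map (fun p => (pget p i, pget p j)),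
        (points.map (fun p => (pget p i, pget p j))).count k = 2 := by
  have hfold : points.foldl
        (fun d p => d.modify (pget p i, pget p j) [] (fun L => L ++ [p])) PySem.Dict.empty
      = (points.map (fun p => ((pget p i, pget p j), p))).foldl
        (fun d q => d.modify q.1 [] (fun L => L ++ [q.2])) PySem.Dict.empty := by
    rw [List.foldl_map]
  have hkeys : (points.foldl
        (fun d p => d.modify (pget p i, pget p j) [] (fun L => L ++ [p]))
        PySem.Dict.empty).keys
      = PySem.Set.update PySem.Dict.empty.keys
          (points.map (fun p => (pget p i, pget p j))) :=
    PySem.Dict.keys_foldl_modify_key points (fun p => (pget p i, pget p j)) []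
      (fun _ p L => L ++ [p]) PySem.Dict.empty
  have hnodup : (points.foldl
        (fun d p => d.modify (pget p i, pget p j) [] (fun L => L ++ [p]))
        PySem.Dict.empty).keys.Nodup :=
    PySem.Dict.nodup_keys_foldl_modify_key points (fun p => (pget p i, pget p j)) []
      (fun _ p L => L ++ [p]) PySem.Dict.empty PySem.Dict.nodup_keys_empty
  have hmemkeys : ∀ c, c ∈ (points.foldl
        (fun d p => d.modify (pget p i, pget p j) [] (fun L => L ++ [p]))
        PySem.Dict.empty).keys ↔ c ∈ points.map (fun p => (pget p i, pget p j)) := by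
    intro c
    rw [hkeys]
    simp [PySem.Set.mem_update, PySem.Dict.keys_empty]
  have hlen : ∀ c, ((points.foldl
        (fun d p => d.modify (pget p i, pget p j) [] (fun L => L ++ [p]))
        PySem.Dict.empty).getD c []).length
      = (points.map (fun p => (pget p i, pget p j))).count c := by
    intro c
    rw [hfold, PySem.Dict.getD_foldl_modify_append, PySem.Dict.getD_empty]
    rw [List.nil_append, List.length_map, List.filter_map, List.length_map]
    rw [← List.countP_eq_length_filter]
    show points.countP (fun p => ((pget p i, pget p j), p).1 == c) = _
    rw [List.count, List.countP_map]
    rfl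
  rw [PySem.Dict.values_eq_map_keys _ hnodup [], List.all_map, List.all_eq_true]
  constructor
  · intro hall k hk
    have := hall k ((hmemkeys k).2 hk)
    simpa [hlen k] using this
  · intro hall k hk
    have := hall k ((hmemkeys k).1 hk)
    simp only [Function.comp]
    simpa [hlen k] using this

theorem axes_eq (points : List (Int × Int × Int)) (axes : List (Nat × Nat)) :
    isxyzAxes points axes = isxyzAltAxes points axes := by
  induction axes with
  | nil => rfl
  | cons ij rest ih =>
    obtain ⟨i, j⟩ := ij
    have hcond : ((points.foldl (fun d p => d.modify (pget p i, pget p j) [] (fun L => L ++ [p]))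
          PySem.Dict.empty).values.all (fun L => L.length == 2))
        = axisRuns (PySem.List.sorted2 (points.map (fun p => (pget p i, pget p j)))
          (fun k => k.1) (fun k => k.2) false) := by
      apply Bool.coe_iff_coe.mp
      exact (Aaxis_iff points i j).trans
        (Baxis_iff (points.map (fun p => (pget p i, pget p j)))).symm
    simp only [isxyzAxes, isxyzAltAxes]
    rw [hcond, ih]

-- ===== VERDICT (by name: the statement is the Claim_ definition above) =====
theorem isxyz_spec : Claim_equal_isxyz := by
  intro points _
  unfold Spec_isxyz isxyz isxyz_alt
  exact axes_eq points _
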